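-- pv_equiv track=rewrite | github.com/e-p-armstrong/augmentoolkit | rptoolkit/steps.py | parse_chatlog
-- ===== SOURCE A (Python) =====
-- def parse_chatlog(chatlog,charname):
--     messages = []
--     current_owner = None
--     current_content = []
--
--     for line in chatlog.split("\n"):
--         if line.startswith(charname + ":") or line.startswith("{user}:"):
--             if current_owner and current_content:
--                 messages.append({"owner": current_owner, "content": "\n".join(current_content)})
--                 current_content = []
--             current_owner = line.split(":")[0]
--             current_content.append(line.split(":")[1])
--         else:
--             if current_owner:
--                 current_content.append(line)
--
--     if current_owner and current_content:
--         messages.append({"owner": current_owner, "content": "\n".join(current_content)})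
--
--     return [{ "owner": message["owner"], "content": message["content"].strip()} for message in messages]
-- ===== SOURCE B (Python) =====
-- def parse_chatlog(chatlog, charname):
--     def is_header(l):
--         return l.startswith(charname + ":") or l.startswith("{user}:")
--
--     lines = chatlog.split("\n")
--     # drop everything before the first header line
--     while lines and not is_header(lines[0]):
--         lines = lines[1:]
--     msgs = []
--     while lines:
--         header, lines = lines[0], lines[1:]
--         body = []
--         while lines and not is_header(lines[0]):
--             body.append(lines[0])
--             lines = lines[1:]
--         parts = header.split(":")
--         msgs.append({"owner": parts[0],
--                      "content": "\n".join([parts[1]] + body).strip()})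
--     return msgs
-- ===== Notes on version B (the rewrite author's own statement) =====
-- stated objective: alternative
-- what changed: B replaces A's single fold with a mutable owner/content accumulator and flush-on-header logic by an explicit block decomposition: drop lines before the first header, then repeatedly take a header plus its span of non-header lines and build each message directly from that block.
-- intended difference: On chatlogs containing a header line whose text before the first colon is empty (a line starting with ':' matching charname+':' — only possible when charname is newline-free and is '' or starts with ':'), A silently drops that message and leaks its content into the next one because Python treats the empty owner string as falsy; B returns the message with owner '' like any other, which is the intended uniform parse. — e.g. on parse_chatlog(":a", ""): A returns [], B returns [[("owner", ""), ("content", "a")]]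
import Mathlib
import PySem

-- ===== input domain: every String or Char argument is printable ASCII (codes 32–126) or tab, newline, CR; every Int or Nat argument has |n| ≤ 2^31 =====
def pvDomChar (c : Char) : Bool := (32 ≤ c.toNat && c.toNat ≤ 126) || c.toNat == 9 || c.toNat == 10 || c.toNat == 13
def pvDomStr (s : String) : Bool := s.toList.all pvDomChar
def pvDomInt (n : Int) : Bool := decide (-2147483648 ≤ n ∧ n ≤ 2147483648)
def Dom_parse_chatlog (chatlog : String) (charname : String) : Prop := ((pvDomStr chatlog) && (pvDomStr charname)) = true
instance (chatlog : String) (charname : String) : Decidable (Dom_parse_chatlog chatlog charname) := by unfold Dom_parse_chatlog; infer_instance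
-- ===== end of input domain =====

-- B parses the chatlog by explicit header/block decomposition instead of A's fold with a
-- flush-on-header accumulator (objective: alternative, same cost); on headers with an empty
-- owner (only reachable when charname is "" or starts with ":") B keeps the message A drops.

-- ===== PORT A =====
-- Python truthiness of current_owner (None or "" are falsy)
def pvTruthyOwner (o : Option String) : Bool :=
  match o with
  | none => false
  | some s => !(s == "")

-- one iteration of A's for-loop; state = (messages, current_owner, current_content)
def pvStepA (charname : String)
    (st : List (String × String) × Option String × List String) (line : String) :
    List (String × String) × Option String × List String :=
  match st with
  | (messages, current_owner, current_content) =>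
    if PySem.Str.startswith line (charname ++ ":") || PySem.Str.startswith line "{user}:" then
      let fl :=
        if pvTruthyOwner current_owner && !current_content.isEmpty then
          (messages ++ [(current_owner.getD "", PySem.Str.join "\n" current_content)],
           ([] : List String))
        else (messages, current_content)
      -- Python's line.split(":")[0] / [1]; indices are in range here since a header line
      -- contains ':' (it starts with something ++ ":"), so Python never raises
      let parts := (PySem.Str.split? line ":").getD []
      (fl.1, some (parts.getD 0 ""), fl.2 ++ [parts.getD 1 ""])
    else
      if pvTruthyOwner current_owner then (messages, current_owner, current_content ++ [line])
      else (messages, current_owner, current_content)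

-- the trailing flush after the loop
def pvFinishA (st : List (String × String) × Option String × List String) :
    List (String × String) :=
  match st with
  | (messages, current_owner, current_content) =>
    if pvTruthyOwner current_owner && !current_content.isEmpty then
      messages ++ [(current_owner.getD "", PySem.Str.join "\n" current_content)]
    else messages

def parse_chatlog (chatlog : String) (charname : String) : List (List (String × String)) :=
  (pvFinishA (((PySem.Str.split? chatlog "\n").getD []).foldl (pvStepA charname)
      ([], none, []))).map
    (fun m => [("owner", m.1), ("content", PySem.Str.strip m.2)])

-- ===== PORT B =====
def pvIsHeaderB (charname line : String) : Bool :=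
  PySem.Str.startswith line (charname ++ ":") || PySem.Str.startswith line "{user}:"

-- build one message dict from a header line and the body lines of its block
def pvMsgB (header : String) (body : List String) : List (String × String) :=
  let parts := (PySem.Str.split? header ":").getD []   -- header contains ':', parts[1] in range
  [("owner", parts.getD 0 ""),
   ("content", PySem.Str.strip (PySem.Str.join "\n" (parts.getD 1 "" :: body)))]

-- the inner while-loop of B: first line is a header; its block is the span of
-- non-header lines that follows
def pvBlocksB (charname : String) : List String → List (List (String × String))
  | [] => []
  | h :: rest =>
      pvMsgB h (rest.takeWhile (fun l => !pvIsHeaderB charname l)) ::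
      pvBlocksB charname (rest.dropWhile (fun l => !pvIsHeaderB charname l))
  termination_by ls => ls.length
  decreasing_by
    exact Nat.lt_succ_of_le (List.length_dropWhile_le _ _)

def parse_chatlog_alt (chatlog : String) (charname : String) : List (List (String × String)) :=
  pvBlocksB charname
    (((PySem.Str.split? chatlog "\n").getD []).dropWhile (fun l => !pvIsHeaderB charname l))

-- ===== PRECONDITION & SPEC =====
-- On chatlogs containing a header line whose text before the first colon is empty (only
-- possible when charname is newline-free and is "" or begins with ':', and charname ++ ':'
-- occurs at the start of the chatlog or right after a newline), A drops that message and leaks its content into the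
-- next one because Python treats the empty owner string as falsy; B returns the message with
-- owner "" like any other, which is the intended uniform parse.
def D_parse_chatlog (chatlog : String) (charname : String) : Prop :=
  '\n' ∉ charname.toList ∧
  (charname.toList = [] ∨ charname.toList.head? = some ':') ∧
  ((charname.toList ++ [':']) <+: chatlog.toList ∨
    ('\n' :: (charname.toList ++ [':'])) <:+: chatlog.toList)

instance (chatlog : String) (charname : String) : Decidable (D_parse_chatlog chatlog charname) := by
  unfold D_parse_chatlog; infer_instance

def Spec_parse_chatlog (chatlog : String) (charname : String)
    (out : List (List (String × String))) : Prop :=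
  ¬ D_parse_chatlog chatlog charname → out = parse_chatlog_alt chatlog charname

instance (chatlog : String) (charname : String) (out : List (List (String × String))) :
    Decidable (Spec_parse_chatlog chatlog charname out) := by
  unfold Spec_parse_chatlog; infer_instance

def pvDiffWitness_parse_chatlog : String × String := (":a", "")

def pvDiffWitnessOut_parse_chatlog :
    (List (List (String × String))) × (List (List (String × String))) :=
  ([], [[("owner", ""), ("content", "a")]])

-- ===== CLAIM (what is proved, stated in full; the proofs are below) =====
def Claim_unchanged_parse_chatlog : Prop :=
  ∀ (chatlog : String) (charname : String), Dom_parse_chatlog chatlog charname →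
    Spec_parse_chatlog chatlog charname (parse_chatlog chatlog charname)

def Claim_changed_parse_chatlog : Prop :=
  Dom_parse_chatlog (pvDiffWitness_parse_chatlog.1) (pvDiffWitness_parse_chatlog.2) ∧
  D_parse_chatlog (pvDiffWitness_parse_chatlog.1) (pvDiffWitness_parse_chatlog.2) ∧
  parse_chatlog (pvDiffWitness_parse_chatlog.1) (pvDiffWitness_parse_chatlog.2) =
    pvDiffWitnessOut_parse_chatlog.1 ∧
  parse_chatlog_alt (pvDiffWitness_parse_chatlog.1) (pvDiffWitness_parse_chatlog.2) =
    pvDiffWitnessOut_parse_chatlog.2 ∧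
  pvDiffWitnessOut_parse_chatlog.1 ≠ pvDiffWitnessOut_parse_chatlog.2

def Claim_exact_parse_chatlog : Prop :=
  ∀ (chatlog : String) (charname : String), Dom_parse_chatlog chatlog charname →
    D_parse_chatlog chatlog charname →
    parse_chatlog chatlog charname ≠ parse_chatlog_alt chatlog charname

-- ===== LEMMAS AND PROOFS =====

-- the final strip-and-wrap step applied to one accumulated (owner, content) pair
def pvMkFin (m : String × String) : List (String × String) :=
  [("owner", m.1), ("content", PySem.Str.strip m.2)]

-- ---- splitOn.go: accumulator and first-chunk structure ----
lemma pv_go_acc (sep : List Char) (fuel : Nat) :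
    ∀ (l cur : List Char) (acc : List (List Char)),
      PySem.Chars.splitOn.go sep fuel l cur acc =
        acc.reverse ++ PySem.Chars.splitOn.go sep fuel l cur [] := by
  induction fuel with
  | zero =>
      intro l cur acc
      simp [PySem.Chars.splitOn.go]
  | succ fuel ih =>
      intro l cur acc
      cases l with
      | nil => simp [PySem.Chars.splitOn.go]
      | cons c rest =>
          simp only [PySem.Chars.splitOn.go]
          by_cases h : sep.isPrefixOf (c :: rest) = true
          · simp only [h, if_true]
            rw [ih _ [] (cur.reverse :: acc), ih _ [] [cur.reverse]]
            simp
          · simp only [eq_false_of_ne_true h, Bool.false_eq_true, if_false]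
            exact ih rest (c :: cur) acc

lemma pv_go_first (sep : List Char) (fuel : Nat) :
    ∀ (l cur : List Char),
      ∃ t rest, PySem.Chars.splitOn.go sep fuel l cur [] = (cur.reverse ++ t) :: rest := by
  induction fuel with
  | zero =>
      intro l cur
      exact ⟨l, [], by simp [PySem.Chars.splitOn.go]⟩
  | succ fuel ih =>
      intro l cur
      cases l with
      | nil => exact ⟨[], [], by simp [PySem.Chars.splitOn.go]⟩
      | cons c rest =>
          simp only [PySem.Chars.splitOn.go]
          by_cases h : sep.isPrefixOf (c :: rest) = true
          · simp only [h, if_true]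
            rw [pv_go_acc sep fuel _ [] [cur.reverse]]
            exact ⟨[], PySem.Chars.splitOn.go sep fuel (List.drop sep.length (c :: rest)) [] [],
              by simp⟩
          · simp only [eq_false_of_ne_true h, Bool.false_eq_true, if_false]
            obtain ⟨t, r, ht⟩ := ih rest (c :: cur)
            exact ⟨c :: t, r, by simpa using ht⟩

-- with enough fuel, every chunk splitOn.go emits on sep ['\n'] is newline-free
lemma pv_go_clean (fuel : Nat) :
    ∀ (l cur : List Char), l.length < fuel → '\n' ∉ cur →
      ∀ chunk ∈ PySem.Chars.splitOn.go ['\n'] fuel l cur [], '\n' ∉ chunk := by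
  induction fuel with
  | zero => intro l cur hlen; omega
  | succ fuel ih =>
      intro l cur hlen hcur chunk hc
      cases l with
      | nil =>
          simp [PySem.Chars.splitOn.go] at hc
          subst hc
          simpa using hcur
      | cons c rest =>
          simp only [PySem.Chars.splitOn.go] at hc
          by_cases h : List.isPrefixOf ['\n'] (c :: rest) = true
          · simp only [h, if_true] at hc
            rw [pv_go_acc _ fuel _ [] [cur.reverse]] at hc
            simp only [List.reverse_cons, List.reverse_nil, List.nil_append,
              List.singleton_append, List.mem_cons] at hc
            rcases hc with hc | hc
            · subst hc; simpa using hcur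
            · refine ih _ [] ?_ (by simp) chunk hc
              simp only [List.length_drop, List.length_cons] at *
              omega
          · simp only [eq_false_of_ne_true h, Bool.false_eq_true, if_false] at hc
            have hcne : c ≠ '\n' := by
              intro hceq
              apply h
              subst hceq
              simp [List.isPrefixOf]
            have hlen' : rest.length < fuel := by
              simp only [List.length_cons] at hlen
              omega
            refine ih rest (c :: cur) hlen' ?_ chunk hc
            intro hmem
            rcases List.mem_cons.mp hmem with hmem | hmem
            · exact hcne hmem.symm
            · exact hcur hmem

-- every line produced by chatlog.split("\n") is newline-free
lemma pv_line_clean (chatlog line : String)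
    (hmem : line ∈ (PySem.Str.split? chatlog "\n").getD []) :
    '\n' ∉ line.toList := by
  have hsplit : PySem.Str.split? chatlog "\n" =
      some ((PySem.Chars.splitOn chatlog.toList ['\n']).map String.ofList) := by
    simp [PySem.Str.split?, PySem.Chars.split?]
  rw [hsplit] at hmem
  simp only [Option.getD_some, List.mem_map] at hmem
  obtain ⟨chunk, hchunk, rfl⟩ := hmem
  unfold PySem.Chars.splitOn at hchunk
  have := pv_go_clean (chatlog.toList.length + 1) chatlog.toList []
    (by omega) (by simp) chunk hchunk
  simpa using this

-- a header line has a nonempty owner unless it starts with ':'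
lemma pv_owner_ne (line : String)
    (hne : line.toList ≠ [])
    (hcol : PySem.Str.startswith line ":" = false) :
    ((PySem.Str.split? line ":").getD []).getD 0 "" ≠ "" := by
  obtain ⟨c, rest, hl⟩ := List.exists_cons_of_ne_nil hne
  have hc : c ≠ ':' := by
    intro hc
    rw [PySem.Str.startswith_eq, hl, hc] at hcol
    simp [PySem.Chars.startswith, List.isPrefixOf] at hcol
  have hsplit : PySem.Str.split? line ":" =
      some ((PySem.Chars.splitOn line.toList [':']).map String.ofList) := by
    simp [PySem.Str.split?, PySem.Chars.split?]
  rw [hsplit]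
  rw [hl]
  show ((PySem.Chars.splitOn (c :: rest) [':']).map String.ofList).getD 0 "" ≠ ""
  unfold PySem.Chars.splitOn PySem.Chars.splitOn.go
  have hpre : List.isPrefixOf [':'] (c :: rest) = false := by
    simp [List.isPrefixOf]
    intro h; exact absurd h.symm hc
  simp only [hpre, Bool.false_eq_true, if_false]
  obtain ⟨t, r, ht⟩ := pv_go_first [':'] (c :: rest).length rest [c]
  rw [ht]
  simp only [List.reverse_cons, List.reverse_nil, List.nil_append, List.singleton_append,
    List.map_cons, List.getD_cons_zero]
  intro h
  have h2 := congrArg String.toList h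
  simp at h2

-- a header line is nonempty (a header prefix ends in ':')
lemma pv_header_ne_nil (charname line : String)
    (h : pvIsHeaderB charname line = true) : line.toList ≠ [] := by
  intro hnil
  unfold pvIsHeaderB at h
  rw [Bool.or_eq_true] at h
  rcases h with h | h <;>
  · rw [PySem.Str.startswith_eq] at h
    rw [PySem.Chars.startswith_iff] at h
    rw [hnil] at h
    have := List.IsPrefix.length_le h
    simp at this

-- every chunk `splitOn.go` emits occurs in the scanned list: first chunk extends
-- cur.reverse by a prefix, every later chunk sits right after an occurrence of sep
lemma pv_go_mem (sep : List Char) (fuel : Nat) :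
    ∀ (l cur : List Char), ∀ chunk ∈ PySem.Chars.splitOn.go sep fuel l cur [],
      (∃ t, chunk = cur.reverse ++ t ∧ t <+: l) ∨ (sep ++ chunk) <:+: l := by
  induction fuel with
  | zero =>
      intro l cur chunk hc
      simp [PySem.Chars.splitOn.go] at hc
      exact Or.inl ⟨l, hc, List.prefix_refl l⟩
  | succ fuel ih =>
      intro l cur chunk hc
      cases l with
      | nil =>
          simp [PySem.Chars.splitOn.go] at hc
          exact Or.inl ⟨[], by simp [hc], List.nil_prefix⟩
      | cons c rest =>
          simp only [PySem.Chars.splitOn.go] at hc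
          by_cases h : sep.isPrefixOf (c :: rest) = true
          · simp only [h, if_true] at hc
            rw [pv_go_acc sep fuel _ [] [cur.reverse]] at hc
            simp only [List.reverse_cons, List.reverse_nil, List.nil_append,
              List.singleton_append, List.mem_cons] at hc
            rcases hc with hc | hc
            · exact Or.inl ⟨[], by simp [hc], List.nil_prefix⟩
            · have hsep : sep <+: (c :: rest) := List.isPrefixOf_iff_prefix.mp h
              obtain ⟨l', hl'⟩ := hsep
              have hdrop : List.drop sep.length (c :: rest) = l' := by
                rw [← hl']; simp
              rw [hdrop] at hc
              rcases ih l' [] chunk hc with ⟨t, ht, htp⟩ | hinf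
              · right
                simp only [List.reverse_nil, List.nil_append] at ht
                subst ht
                obtain ⟨u, hu⟩ := htp
                have hpre : (sep ++ chunk) <+: (c :: rest) := by
                  rw [← hl', ← hu]
                  exact ⟨u, by simp⟩
                exact hpre.isInfix
              · refine Or.inr (hinf.trans ?_)
                rw [← hl']
                exact (List.suffix_append sep l').isInfix
          · simp only [eq_false_of_ne_true h, Bool.false_eq_true, if_false] at hc
            rcases ih rest (c :: cur) chunk hc with ⟨t, ht, htp⟩ | hinf
            · exact Or.inl ⟨c :: t, by simpa using ht, List.cons_prefix_cons.mpr ⟨rfl, htp⟩⟩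
            · exact Or.inr (hinf.trans (List.suffix_cons c rest).isInfix)

-- every line of chatlog.split("\n") occurs at the start of chatlog or right after '\n'
lemma pv_line_occurs (chatlog line : String)
    (hmem : line ∈ (PySem.Str.split? chatlog "\n").getD []) :
    line.toList <+: chatlog.toList ∨ ('\n' :: line.toList) <:+: chatlog.toList := by
  have hsplit : PySem.Str.split? chatlog "\n" =
      some ((PySem.Chars.splitOn chatlog.toList ['\n']).map String.ofList) := by
    simp [PySem.Str.split?, PySem.Chars.split?]
  rw [hsplit] at hmem
  simp only [Option.getD_some, List.mem_map] at hmem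
  obtain ⟨chunk, hchunk, rfl⟩ := hmem
  unfold PySem.Chars.splitOn at hchunk
  have hocc := pv_go_mem ['\n'] (chatlog.toList.length + 1) chatlog.toList [] chunk hchunk
  have htl : (String.ofList chunk).toList = chunk := by simp
  rw [htl]
  rcases hocc with ⟨t, ht, htp⟩ | hinf
  · exact Or.inl (by simpa [ht] using htp)
  · exact Or.inr (by simpa using hinf)

-- under ¬D_ no header line starts with ':'
lemma pv_header_not_colon (chatlog charname line : String)
    (hD : ¬ D_parse_chatlog chatlog charname)
    (hmem : line ∈ (PySem.Str.split? chatlog "\n").getD [])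
    (hh : pvIsHeaderB charname line = true) :
    PySem.Str.startswith line ":" = false := by
  unfold pvIsHeaderB at hh
  rw [Bool.or_eq_true] at hh
  by_cases hcol : PySem.Str.startswith line ":" = true
  · rcases hh with h | h
    · -- line starts with charname ++ ":" and with ":", so D_ holds
      exfalso
      apply hD
      rw [PySem.Str.startswith_eq, PySem.Chars.startswith_iff] at h hcol
      have hp : (charname.toList ++ [':']) <+: line.toList := by
        have : (charname ++ ":").toList = charname.toList ++ [':'] := by
          simp [String.toList_append]
        rwa [this] at h
      refine ⟨?_, ?_, ?_⟩
      · -- charname is newline-free: it is a prefix of the newline-free line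
        intro hnl
        exact pv_line_clean chatlog line hmem
          ((hp.subset) (List.mem_append.mpr (Or.inl hnl)))
      · cases hcn : charname.toList with
        | nil => exact Or.inl rfl
        | cons d l' =>
            right
            rw [hcn] at hp
            rw [show (":").toList = [':'] from by decide] at hcol
            obtain ⟨t1, h1⟩ := hp
            obtain ⟨t2, h2⟩ := hcol
            rw [← h2] at h1
            simp only [List.cons_append, List.cons.injEq] at h1
            simp [h1.1]
      · rcases pv_line_occurs chatlog line hmem with hpre | hinf
        · exact Or.inl (hp.trans hpre)
        · exact Or.inr ((List.cons_prefix_cons.mpr ⟨rfl, hp⟩).isInfix.trans hinf)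
    · -- line starts with "{user}:" so its first char is '{', not ':'
      exfalso
      rw [PySem.Str.startswith_eq, PySem.Chars.startswith_iff] at h hcol
      obtain ⟨t1, h1⟩ := h
      obtain ⟨t2, h2⟩ := hcol
      rw [← h2] at h1
      rw [show ("{user}:".toList) = ['{', 'u', 's', 'e', 'r', '}', ':'] from by decide,
          show ((":").toList) = [':'] from by decide] at h1
      simp at h1
  · exact eq_false_of_ne_true hcol

-- the owner recorded at a header line is nonempty under ¬D_
lemma pv_owner_ok (chatlog charname line : String)
    (hD : ¬ D_parse_chatlog chatlog charname)
    (hmem : line ∈ (PySem.Str.split? chatlog "\n").getD [])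
    (hh : pvIsHeaderB charname line = true) :
    ((PySem.Str.split? line ":").getD []).getD 0 "" ≠ "" :=
  pv_owner_ne line (pv_header_ne_nil charname line hh)
    (pv_header_not_colon chatlog charname line hD hmem hh)

-- ---- the core invariant: A's fold from a live state produces B's blocks ----
lemma pv_gather (chatlog charname : String)
    (hD : ¬ D_parse_chatlog chatlog charname) :
    ∀ (ls : List String) (msgs : List (String × String)) (o : String) (cc : List String),
      (∀ l ∈ ls, l ∈ (PySem.Str.split? chatlog "\n").getD []) →
      o ≠ "" → cc ≠ [] →
      (pvFinishA (ls.foldl (pvStepA charname) (msgs, some o, cc))).map pvMkFin =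
        msgs.map pvMkFin ++
          pvMkFin (o, PySem.Str.join "\n" (cc ++ ls.takeWhile (fun l => !pvIsHeaderB charname l))) ::
          pvBlocksB charname (ls.dropWhile (fun l => !pvIsHeaderB charname l)) := by
  intro ls
  induction ls with
  | nil =>
      intro msgs o cc _ ho hcc
      simp [pvFinishA, pvTruthyOwner, ho, List.isEmpty_eq_false_iff.mpr hcc, pvBlocksB]
  | cons l ls ih =>
      intro msgs o cc hmem ho hcc
      by_cases hh : pvIsHeaderB charname l = true
      · -- header line: A flushes, B starts a new block here
        have hown := pv_owner_ok chatlog charname l hD (hmem l (by simp)) hh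
        have hcond : (PySem.Str.startswith l (charname ++ ":") ||
            PySem.Str.startswith l "{user}:") = true := by simpa [pvIsHeaderB] using hh
        have hstep : pvStepA charname (msgs, some o, cc) l =
            (msgs ++ [(o, PySem.Str.join "\n" cc)],
             some (((PySem.Str.split? l ":").getD []).getD 0 ""),
             [((PySem.Str.split? l ":").getD []).getD 1 ""]) := by
          simp only [pvStepA, hcond, if_true]
          simp [pvTruthyOwner, ho, List.isEmpty_eq_false_iff.mpr hcc]
        rw [List.foldl_cons, hstep,
          ih _ _ _ (fun x hx => hmem x (List.mem_cons_of_mem _ hx)) hown (by simp)]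
        rw [List.takeWhile_cons_of_neg (by simp [hh]),
            List.dropWhile_cons_of_neg (by simp [hh])]
        simp [pvBlocksB, pvMsgB, pvMkFin]
      · -- body line: A appends it to current_content
        have hcond : (PySem.Str.startswith l (charname ++ ":") ||
            PySem.Str.startswith l "{user}:") = false := by
          simpa [pvIsHeaderB] using eq_false_of_ne_true hh
        have hstep : pvStepA charname (msgs, some o, cc) l = (msgs, some o, cc ++ [l]) := by
          simp only [pvStepA, hcond, Bool.false_eq_true, if_false]
          simp [pvTruthyOwner, ho]
        rw [List.foldl_cons, hstep,
          ih _ _ _ (fun x hx => hmem x (List.mem_cons_of_mem _ hx)) ho (by simp)]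
        rw [List.takeWhile_cons_of_pos (by simp [hh]),
            List.dropWhile_cons_of_pos (by simp [hh])]
        simp

-- before the first header A's state is inert
lemma pv_main (chatlog charname : String)
    (hD : ¬ D_parse_chatlog chatlog charname) :
    ∀ (ls : List String),
      (∀ l ∈ ls, l ∈ (PySem.Str.split? chatlog "\n").getD []) →
      (pvFinishA (ls.foldl (pvStepA charname) ([], none, []))).map pvMkFin =
        pvBlocksB charname (ls.dropWhile (fun l => !pvIsHeaderB charname l)) := by
  intro ls
  induction ls with
  | nil => intro _; simp [pvFinishA, pvTruthyOwner, pvBlocksB]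
  | cons l ls ih =>
      intro hmem
      by_cases hh : pvIsHeaderB charname l = true
      · have hown := pv_owner_ok chatlog charname l hD (hmem l (by simp)) hh
        have hcond : (PySem.Str.startswith l (charname ++ ":") ||
            PySem.Str.startswith l "{user}:") = true := by simpa [pvIsHeaderB] using hh
        have hstep : pvStepA charname ([], none, []) l =
            ([], some (((PySem.Str.split? l ":").getD []).getD 0 ""),
             [((PySem.Str.split? l ":").getD []).getD 1 ""]) := by
          simp only [pvStepA, hcond, if_true]
          simp [pvTruthyOwner]
        rw [List.foldl_cons, hstep,
          pv_gather chatlog charname hD ls _ _ _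
            (fun x hx => hmem x (List.mem_cons_of_mem _ hx)) hown (by simp)]
        rw [List.dropWhile_cons_of_neg (by simp [hh])]
        simp [pvBlocksB, pvMsgB, pvMkFin]
      · have hcond : (PySem.Str.startswith l (charname ++ ":") ||
            PySem.Str.startswith l "{user}:") = false := by
          simpa [pvIsHeaderB] using eq_false_of_ne_true hh
        have hstep : pvStepA charname ([], none, []) l = ([], none, []) := by
          simp only [pvStepA, hcond, Bool.false_eq_true, if_false]
          simp [pvTruthyOwner]
        rw [List.foldl_cons, hstep, ih (fun x hx => hmem x (List.mem_cons_of_mem _ hx)),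
          List.dropWhile_cons_of_pos (by simp [hh])]


-- ---- tightness: inside D_ the two programs always disagree ----

-- join chunks back with '\n'
def pvGlue : List (List Char) → List Char
  | [] => []
  | [x] => x
  | x :: y :: xs => x ++ '\n' :: pvGlue (y :: xs)

lemma pv_glue_cons (x : List Char) (xs : List (List Char)) (h : xs ≠ []) :
    pvGlue (x :: xs) = x ++ '\n' :: pvGlue xs := by
  cases xs with
  | nil => exact absurd rfl h
  | cons y ys => rfl

lemma pv_go_ne_nil (sep : List Char) (fuel : Nat) (l cur : List Char) :
    PySem.Chars.splitOn.go sep fuel l cur [] ≠ [] := by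
  obtain ⟨t, r, ht⟩ := pv_go_first sep fuel l cur
  simp [ht]

-- splitting and re-joining is the identity
lemma pv_go_glue (fuel : Nat) :
    ∀ (l cur : List Char),
      pvGlue (PySem.Chars.splitOn.go ['\n'] fuel l cur []) = cur.reverse ++ l := by
  induction fuel with
  | zero => intro l cur; simp [PySem.Chars.splitOn.go, pvGlue]
  | succ fuel ih =>
      intro l cur
      cases l with
      | nil => simp [PySem.Chars.splitOn.go, pvGlue]
      | cons c rest =>
          simp only [PySem.Chars.splitOn.go]
          by_cases h : List.isPrefixOf ['\n'] (c :: rest) = true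
          · have hc : c = '\n' := by
              have h' : '\n' = c := by simpa [List.isPrefixOf] using h
              exact h'.symm
            simp only [h, if_true]
            rw [pv_go_acc _ fuel _ [] [cur.reverse]]
            simp only [List.reverse_cons, List.reverse_nil, List.nil_append,
              List.singleton_append]
            rw [pv_glue_cons _ _ (pv_go_ne_nil _ _ _ _), ih _ []]
            simp [hc]
          · simp only [eq_false_of_ne_true h, Bool.false_eq_true, if_false]
            rw [ih rest (c :: cur)]
            simp

lemma pv_splitOn_glue (cs : List Char) :
    pvGlue (PySem.Chars.splitOn cs ['\n']) = cs := by
  unfold PySem.Chars.splitOn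
  simpa using pv_go_glue (cs.length + 1) cs []

lemma pv_splitOn_ne_nil (cs : List Char) : PySem.Chars.splitOn cs ['\n'] ≠ [] := by
  unfold PySem.Chars.splitOn
  exact pv_go_ne_nil _ _ _ _

lemma pv_splitOn_clean (cs : List Char) :
    ∀ chunk ∈ PySem.Chars.splitOn cs ['\n'], '\n' ∉ chunk := by
  unfold PySem.Chars.splitOn
  exact pv_go_clean (cs.length + 1) cs [] (by omega) (by simp)

-- a prefix of a glued list is a prefix of some chunk (both newline-free)
lemma pv_P1 (p : List Char) (hp : '\n' ∉ p) :
    ∀ (chunks : List (List Char)), chunks ≠ [] → (∀ ch ∈ chunks, '\n' ∉ ch) →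
      p <+: pvGlue chunks → ∃ ch ∈ chunks, p <+: ch := by
  intro chunks
  induction chunks with
  | nil => intro h; exact absurd rfl h
  | cons x xs ih =>
      intro _ hclean hpre
      cases xs with
      | nil => exact ⟨x, by simp, by simpa [pvGlue] using hpre⟩
      | cons y ys =>
          rw [pv_glue_cons x (y :: ys) (by simp)] at hpre
          have hx : x <+: x ++ '\n' :: pvGlue (y :: ys) := List.prefix_append x _
          rcases List.prefix_or_prefix_of_prefix hpre hx with hpx | hxp
          · exact ⟨x, by simp, hpx⟩
          · obtain ⟨q, hq⟩ := hxp
            obtain ⟨u, hu⟩ := hpre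
            rw [← hq, List.append_assoc] at hu
            have hqu : q ++ u = '\n' :: pvGlue (y :: ys) := List.append_cancel_left hu
            cases q with
            | nil => exact ⟨x, by simp, by simp [← hq]⟩
            | cons d q' =>
                exfalso
                apply hp
                rw [← hq]
                have hd : d = '\n' := by
                  have := congrArg (fun l => l.head?) hqu
                  simpa using this
                simp [hd]

-- an occurrence '\n' ++ p inside x ++ '\n' :: r (x newline-free) lands at the
-- separator or further right
lemma pv_P2' (p : List Char) :
    ∀ (x : List Char), '\n' ∉ x → ∀ (r : List Char),
      ('\n' :: p) <:+: (x ++ '\n' :: r) → p <+: r ∨ ('\n' :: p) <:+: r := by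
  intro x
  induction x with
  | nil =>
      intro _ r hinf
      obtain ⟨u, v, huv⟩ := hinf
      cases u with
      | nil =>
          left
          simp only [List.nil_append, List.cons_append, List.cons.injEq] at huv
          exact ⟨v, huv.2⟩
      | cons d u' =>
          right
          simp only [List.cons_append, List.nil_append, List.cons.injEq] at huv
          exact ⟨u', v, huv.2⟩
  | cons c x' ih =>
      intro hcl r hinf
      obtain ⟨u, v, huv⟩ := hinf
      cases u with
      | nil =>
          exfalso
          simp only [List.nil_append, List.cons_append, List.cons.injEq] at huv
          exact hcl (by simp [← huv.1])
      | cons d u' =>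
          simp only [List.cons_append, List.cons.injEq] at huv
          exact ih (fun hm => hcl (List.mem_cons_of_mem c hm)) r ⟨u', v, huv.2⟩

-- a post-newline occurrence of p in a glued list is a prefix of some chunk
lemma pv_P2 (p : List Char) (hp : '\n' ∉ p) :
    ∀ (chunks : List (List Char)), (∀ ch ∈ chunks, '\n' ∉ ch) →
      ('\n' :: p) <:+: pvGlue chunks → ∃ ch ∈ chunks, p <+: ch := by
  intro chunks
  induction chunks with
  | nil =>
      intro _ hinf
      simp [pvGlue] at hinf
  | cons x xs ih =>
      intro hclean hinf
      cases xs with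
      | nil =>
          exfalso
          exact hclean x (by simp) (hinf.subset (by simp))
      | cons y ys =>
          rw [pv_glue_cons x (y :: ys) (by simp)] at hinf
          rcases pv_P2' p x (hclean x (by simp)) _ hinf with hpre | hinf'
          · obtain ⟨ch, hch, hpc⟩ := pv_P1 p hp (y :: ys) (by simp)
              (fun c hc => hclean c (List.mem_cons_of_mem x hc)) hpre
            exact ⟨ch, List.mem_cons_of_mem x hch, hpc⟩
          · obtain ⟨ch, hch, hpc⟩ := ih (fun c hc => hclean c (List.mem_cons_of_mem x hc)) hinf'
            exact ⟨ch, List.mem_cons_of_mem x hch, hpc⟩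

-- a line starting with ':' has owner "" (the first piece of line.split(":"))
lemma pv_owner_colon (line : String) (r : List Char) (hl : line.toList = ':' :: r) :
    ((PySem.Str.split? line ":").getD []).getD 0 "" = "" := by
  have hsplit : PySem.Str.split? line ":" =
      some ((PySem.Chars.splitOn line.toList [':']).map String.ofList) := by
    simp [PySem.Str.split?, PySem.Chars.split?]
  rw [hsplit, hl]
  unfold PySem.Chars.splitOn
  simp only [Option.getD_some]
  have hpre : List.isPrefixOf [':'] (':' :: r) = true := by simp [List.isPrefixOf]
  simp only [List.length_cons, PySem.Chars.splitOn.go, hpre, if_true]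
  rw [pv_go_acc [':'] (r.length + 1) _ [] [[].reverse]]
  simp

-- inside D_ some line of the chatlog is a header whose owner is empty
lemma pv_D_line (chatlog charname : String) (hD : D_parse_chatlog chatlog charname) :
    ∃ line ∈ (PySem.Str.split? chatlog "\n").getD [],
      pvIsHeaderB charname line = true ∧
      ((PySem.Str.split? line ":").getD []).getD 0 "" = "" := by
  obtain ⟨hnl, hhead, hocc⟩ := hD
  have hsplit : PySem.Str.split? chatlog "\n" =
      some ((PySem.Chars.splitOn chatlog.toList ['\n']).map String.ofList) := by
    simp [PySem.Str.split?, PySem.Chars.split?]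
  set p := charname.toList ++ [':'] with hpdef
  have hpnl : '\n' ∉ p := by
    intro hm
    rcases List.mem_append.mp hm with hm | hm
    · exact hnl hm
    · simp at hm
  have hchunk : ∃ ch ∈ PySem.Chars.splitOn chatlog.toList ['\n'], p <+: ch := by
    rcases hocc with hpre | hinf
    · exact pv_P1 p hpnl _ (pv_splitOn_ne_nil _) (pv_splitOn_clean _)
        (by rwa [pv_splitOn_glue])
    · exact pv_P2 p hpnl _ (pv_splitOn_clean _) (by rwa [pv_splitOn_glue])
  obtain ⟨ch, hch, hpc⟩ := hchunk
  refine ⟨String.ofList ch, ?_, ?_, ?_⟩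
  · rw [hsplit]
    simp only [Option.getD_some, List.mem_map]
    exact ⟨ch, hch, rfl⟩
  · unfold pvIsHeaderB
    rw [Bool.or_eq_true]
    left
    rw [PySem.Str.startswith_eq, PySem.Chars.startswith_iff]
    have h1 : (charname ++ ":").toList = p := by
      rw [hpdef]
      simp [String.toList_append]
    have h2 : (String.ofList ch).toList = ch := by simp
    rw [h1, h2]
    exact hpc
  · -- the chunk starts with ':' so its owner piece is empty
    have hcolon : ∃ r, (String.ofList ch).toList = ':' :: r := by
      have h2 : (String.ofList ch).toList = ch := by simp
      rcases hhead with hnil | hhd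
      · obtain ⟨t, ht⟩ := hpc
        rw [hpdef, hnil] at ht
        exact ⟨t, by simp [← ht]⟩
      · cases hcn : charname.toList with
        | nil => rw [hcn] at hhd; simp at hhd
        | cons d l' =>
            rw [hcn] at hhd
            simp only [List.head?_cons, Option.some.injEq] at hhd
            obtain ⟨t, ht⟩ := hpc
            rw [hpdef, hcn] at ht
            exact ⟨l' ++ [':'] ++ t, by simp [← ht, hhd]⟩
    obtain ⟨r, hr⟩ := hcolon
    exact pv_owner_colon _ r hr

-- every message A ever emits has a nonempty owner
lemma pv_A_owners (charname : String) :
    ∀ (ls : List String) (msgs : List (String × String)) (co : Option String)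
      (cc : List String), (∀ m ∈ msgs, m.1 ≠ "") →
      ∀ m ∈ pvFinishA (ls.foldl (pvStepA charname) (msgs, co, cc)), m.1 ≠ "" := by
  intro ls
  induction ls with
  | nil =>
      intro msgs co cc hmsgs m hm
      simp only [List.foldl_nil] at hm
      have hfe : pvFinishA (msgs, co, cc) =
          if (pvTruthyOwner co && !cc.isEmpty) = true then
            msgs ++ [(co.getD "", PySem.Str.join "\n" cc)] else msgs := rfl
      rw [hfe] at hm
      by_cases ht : (pvTruthyOwner co && !cc.isEmpty) = true
      · rw [if_pos ht] at hm
        rcases List.mem_append.mp hm with h' | h'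
        · exact hmsgs m h'
        · cases co with
          | none => simp [pvTruthyOwner] at ht
          | some o =>
              simp only [List.mem_singleton] at h'
              subst h'
              simp only [Option.getD_some]
              simpa [pvTruthyOwner] using ((Bool.and_eq_true _ _).mp ht).1
      · rw [if_neg ht] at hm
        exact hmsgs m hm
  | cons l ls ih =>
      intro msgs co cc hmsgs m hm
      rw [List.foldl_cons] at hm
      by_cases hh : (PySem.Str.startswith l (charname ++ ":") ||
          PySem.Str.startswith l "{user}:") = true
      · by_cases ht : (pvTruthyOwner co && !cc.isEmpty) = true
        · have hstep : pvStepA charname (msgs, co, cc) l =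
              (msgs ++ [(co.getD "", PySem.Str.join "\n" cc)],
               some (((PySem.Str.split? l ":").getD []).getD 0 ""),
               [((PySem.Str.split? l ":").getD []).getD 1 ""]) := by
            simp only [pvStepA, hh, if_true, ht]
            simp
          rw [hstep] at hm
          refine ih _ _ _ ?_ m hm
          intro m' hm'
          rcases List.mem_append.mp hm' with h' | h'
          · exact hmsgs m' h'
          · cases co with
            | none => simp [pvTruthyOwner] at ht
            | some o =>
                simp only [List.mem_singleton] at h'
                subst h'
                simpa [pvTruthyOwner] using ((Bool.and_eq_true _ _).mp ht).1
        · have hstep : pvStepA charname (msgs, co, cc) l =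
              (msgs, some (((PySem.Str.split? l ":").getD []).getD 0 ""),
               cc ++ [((PySem.Str.split? l ":").getD []).getD 1 ""]) := by
            simp only [pvStepA, hh, if_true, eq_false_of_ne_true ht]
            simp
          rw [hstep] at hm
          exact ih _ _ _ hmsgs m hm
      · by_cases ht : pvTruthyOwner co = true
        · have hstep : pvStepA charname (msgs, co, cc) l = (msgs, co, cc ++ [l]) := by
            simp only [pvStepA, eq_false_of_ne_true hh, Bool.false_eq_true, if_false, ht,
              if_true]
          rw [hstep] at hm
          exact ih _ _ _ hmsgs m hm
        · have hstep : pvStepA charname (msgs, co, cc) l = (msgs, co, cc) := by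
            simp only [pvStepA, eq_false_of_ne_true hh, Bool.false_eq_true, if_false,
              eq_false_of_ne_true ht]
          rw [hstep] at hm
          exact ih _ _ _ hmsgs m hm

-- every header line of ls contributes a block built from it
lemma pv_B_block (charname : String) :
    ∀ (n : Nat) (ls : List String), ls.length ≤ n → ∀ l ∈ ls,
      pvIsHeaderB charname l = true →
      ∃ body, pvMsgB l body ∈
        pvBlocksB charname (ls.dropWhile (fun x => !pvIsHeaderB charname x)) := by
  intro n
  induction n with
  | zero =>
      intro ls hlen l hl
      rw [List.length_eq_zero_iff.mp (Nat.le_zero.mp hlen)] at hl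
      simp at hl
  | succ n ih =>
      intro ls hlen l hl hh
      cases ls with
      | nil => simp at hl
      | cons x rest =>
          by_cases hx : pvIsHeaderB charname x = true
          · rw [List.dropWhile_cons_of_neg (by simp [hx])]
            rw [pvBlocksB]
            rcases List.mem_cons.mp hl with rfl | hl'
            · exact ⟨rest.takeWhile (fun x => !pvIsHeaderB charname x), by simp⟩
            · obtain ⟨body, hbody⟩ := ih rest
                (by simpa using Nat.le_of_succ_le_succ (by simpa using hlen)) l hl' hh
              exact ⟨body, List.mem_cons_of_mem _ hbody⟩
          · rw [List.dropWhile_cons_of_pos (by simp [hx])]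
            rcases List.mem_cons.mp hl with rfl | hl'
            · exact absurd hh hx
            · exact ih rest (by simpa using Nat.le_of_succ_le_succ (by simpa using hlen))
                l hl' hh

-- ===== VERDICT (by name: the statement is the Claim_ definition above) =====
theorem parse_chatlog_spec : Claim_unchanged_parse_chatlog := by
  intro chatlog charname _ hD
  unfold parse_chatlog parse_chatlog_alt
  have := pv_main chatlog charname hD ((PySem.Str.split? chatlog "\n").getD []) (fun _ h => h)
  simpa [pvMkFin] using this

theorem parse_chatlog_tight : Claim_exact_parse_chatlog := by
  intro chatlog charname _ hD heq
  obtain ⟨line, hmem, hh, hown⟩ := pv_D_line chatlog charname hD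
  obtain ⟨body, hblock⟩ := pv_B_block charname
    ((PySem.Str.split? chatlog "\n").getD []).length _ le_rfl line hmem hh
  -- the block built from `line` has owner "", and it is in B's output
  have hBmem : pvMsgB line body ∈ parse_chatlog_alt chatlog charname := by
    unfold parse_chatlog_alt
    exact hblock
  rw [← heq] at hBmem
  -- but every message in A's output has a nonempty owner
  unfold parse_chatlog at hBmem
  obtain ⟨m, hmA, hmEq⟩ := List.mem_map.mp hBmem
  have hne := pv_A_owners charname ((PySem.Str.split? chatlog "\n").getD []) [] none []
    (by simp) m hmA
  have : ("owner", m.1) = ("owner", ((PySem.Str.split? line ":").getD []).getD 0 "") := by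
    have := congrArg (fun l => l.head?) hmEq
    simpa [pvMsgB] using this
  rw [hown] at this
  exact hne (by simpa using congrArg Prod.snd this)

theorem parse_chatlog_changed : Claim_changed_parse_chatlog := by
  unfold Claim_changed_parse_chatlog
  refine ⟨by decide, by decide, by decide, ?_, by decide⟩
  show parse_chatlog_alt ":a" "" = [[("owner", ""), ("content", "a")]]
  rw [parse_chatlog_alt,
    show ((PySem.Str.split? ":a" "\n").getD []).dropWhile (fun l => !pvIsHeaderB "" l) = [":a"]
      from by decide]
  rw [pvBlocksB]
  simp only [List.takeWhile_nil, List.dropWhile_nil, pvBlocksB]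
  decide
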